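-- pv_equiv track=rewrite | github.com/JakeDam/regulatory_motifs | script.py | pattern_sequence_dist
-- ===== SOURCE A (Python) =====
-- def hamming_dist(seqA, seqB):
--     h_dist = 0
--     for i in range(0, len(seqA)):
--         if seqA[i] != seqB[i]:
--             h_dist += 1
--     return h_dist
--
-- def pattern_sequence_dist(pattern, dna):
--     k = len(pattern)
--     distance = 0
--     for sequence in dna:
--         hamming_distance = float('inf')
--         for i in range(len(sequence) - k + 1):
--             if hamming_distance > hamming_dist(pattern, sequence[i:i+k]):
--                 hamming_distance = hamming_dist(pattern, sequence[i:i+k])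
--         distance += hamming_distance
--     return distance
-- ===== SOURCE B (Python) =====
-- def pattern_sequence_dist(pattern, dna):
--     k = len(pattern)
--     total = 0
--     for seq in dna:
--         counts = [0] * (len(seq) - k + 1)
--         for j, c in enumerate(pattern):
--             counts = [n + 1 if seq[i + j] != c else n for i, n in enumerate(counts)]
--         total += min(counts)
--     return total
-- ===== Notes on version B (the rewrite author's own statement) =====
-- stated objective: alternative
-- what changed: Transposed loop order: instead of recomputing a Hamming-distance helper on every window slice (twice per comparison), B sweeps the pattern once per sequence, maintaining an array of per-window mismatch counts updated position by position, then takes the built-in min; no slicing, no helper, half the character comparisons.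
-- outside the precondition, e.g. on pattern_sequence_dist('ab', ['a']): A returns inf, B raises ValueError
import Mathlib
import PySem

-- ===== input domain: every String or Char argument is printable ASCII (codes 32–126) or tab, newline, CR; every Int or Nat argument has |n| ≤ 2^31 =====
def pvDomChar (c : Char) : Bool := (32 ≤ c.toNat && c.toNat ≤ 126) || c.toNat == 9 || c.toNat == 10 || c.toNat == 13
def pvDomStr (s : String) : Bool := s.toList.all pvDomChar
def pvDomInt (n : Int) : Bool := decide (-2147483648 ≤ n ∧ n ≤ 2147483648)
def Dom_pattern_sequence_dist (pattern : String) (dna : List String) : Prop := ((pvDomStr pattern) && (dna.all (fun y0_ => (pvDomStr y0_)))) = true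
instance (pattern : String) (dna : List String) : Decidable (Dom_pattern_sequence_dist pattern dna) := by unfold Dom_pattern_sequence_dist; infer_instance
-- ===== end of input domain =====

-- B transposes the loops (per-window mismatch-count array swept once per pattern position,
-- then built-in min) instead of A's per-window slice + twice-called Hamming helper; same cost class.

-- ===== PORT A =====
-- helper hamming_dist; inside A's calls both strings have equal length, so the Option
-- comparison (none never occurs there) is exact.
def hammingDistA (seqA seqB : List Char) : Int :=
  (PySem.List.pyRange 0 (seqA.length : Int) 1).foldl
    (fun h i => if PySem.List.pyGet? seqA i ≠ PySem.List.pyGet? seqB i then h + 1 else h) 0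

-- `float('inf') > d` is always true: modelled by `none` with this comparison.
def pyInfGt (hd : Option Int) (d : Int) : Bool :=
  match hd with
  | none => true
  | some v => d < v

-- under Pre_ every inner loop runs at least once, so the accumulator is `some _`
-- when added (`.getD 0` never hits its `none` case inside Pre_).
def pattern_sequence_dist (pattern : String) (dna : List String) : Int :=
  let k : Int := pattern.toList.length
  dna.foldl (fun distance sequence =>
    let s := sequence.toList
    let hd : Option Int :=
      (PySem.List.pyRange 0 ((s.length : Int) - k + 1) 1).foldl
        (fun hd i =>
          if pyInfGt hd (hammingDistA pattern.toList (PySem.List.slice s (some i) (some (i + k))))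
          then some (hammingDistA pattern.toList (PySem.List.slice s (some i) (some (i + k))))
          else hd) none
    distance + hd.getD 0) 0

-- ===== PORT B =====
def pattern_sequence_dist_alt (pattern : String) (dna : List String) : Int :=
  let k := pattern.toList.length
  dna.foldl (fun total sequence =>
    let s := sequence.toList
    let counts : List Int := List.replicate (s.length + 1 - k) 0
    let counts :=
      (PySem.List.enumerate pattern.toList 0).foldl
        (fun counts jc =>
          (PySem.List.enumerate counts 0).map
            (fun iN => if PySem.List.pyGet? s (iN.1 + jc.1) ≠ some jc.2 then iN.2 + 1 else iN.2))
        counts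
    total + (PySem.List.min? counts (fun x => x)).getD 0) 0

-- ===== PRECONDITION & SPEC =====
-- Pre_ excludes inputs where some sequence is shorter than the pattern: there A adds
-- float('inf') and returns a float, not an int (B raises ValueError on min of an empty list).
def Pre_pattern_sequence_dist (pattern : String) (dna : List String) : Prop :=
  ∀ sq ∈ dna, pattern.toList.length ≤ sq.toList.length
instance (pattern : String) (dna : List String) : Decidable (Pre_pattern_sequence_dist pattern dna) := by unfold Pre_pattern_sequence_dist; infer_instance

def pvWitness_pattern_sequence_dist : String × List String := ("AA", ["ACAA", "CC"])

def Spec_pattern_sequence_dist (pattern : String) (dna : List String) (out : Int) : Prop := out = pattern_sequence_dist_alt pattern dna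
instance (pattern : String) (dna : List String) (out : Int) : Decidable (Spec_pattern_sequence_dist pattern dna out) := by unfold Spec_pattern_sequence_dist; infer_instance

-- ===== CLAIM (what is proved, stated in full; the proofs are below) =====
def Claim_equal_pattern_sequence_dist : Prop := ∀ (pattern : String) (dna : List String), Dom_pattern_sequence_dist pattern dna → Pre_pattern_sequence_dist pattern dna → Spec_pattern_sequence_dist pattern dna (pattern_sequence_dist pattern dna)

-- ===== LEMMAS AND PROOFS =====

-- mismatch count of pattern-suffix ps (placed at pattern offset j0) against window i of s
def partialMism (s ps : List Char) (j0 i : Nat) : Int :=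
  ((List.range ps.length).countP (fun t => s[i + j0 + t]? ≠ ps[t]?) : Nat)

-- counting fold
theorem foldl_count_if_gen {α : Type} (q : α → Prop) [DecidablePred q] :
    ∀ (l : List α) (a : Int),
      l.foldl (fun h i => if q i then h + 1 else h) a = a + ((l.countP (fun i => decide (q i)) : Nat) : Int) := by
  intro l
  induction l with
  | nil => intro a; simp
  | cons x t ih =>
    intro a
    simp only [List.foldl_cons, List.countP_cons, ih]
    by_cases h : q x
    · simp only [h, if_pos, decide_true]; push_cast; ring
    · simp [h]

theorem hammingDistA_eq_count (p w : List Char) :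
    hammingDistA p w = ((List.range p.length).countP (fun j => p[j]? ≠ w[j]?) : Nat) := by
  unfold hammingDistA
  rw [PySem.List.pyRange_one, List.foldl_map]
  simp only [zero_add, sub_zero, Int.toNat_natCast]
  rw [foldl_count_if_gen (fun j : Nat => PySem.List.pyGet? p (j : Int) ≠ PySem.List.pyGet? w (j : Int))]
  simp

theorem window_eq (p s : List Char) (i : Nat) (_hik : i + p.length ≤ s.length) :
    hammingDistA p (PySem.List.slice s (some (i : Int)) (some ((i : Int) + (p.length : Int)))) =
      partialMism s p 0 i := by
  rw [PySem.List.slice_natCast_add, hammingDistA_eq_count]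
  unfold partialMism
  congr 1
  apply List.countP_congr
  intro t ht
  simp only [List.mem_range] at ht
  have h1 : ((s.drop i).take p.length)[t]? = s[i + t]? := by
    rw [List.getElem?_take, if_pos ht, List.getElem?_drop]
  simp only [h1, decide_eq_true_eq, Nat.add_zero]
  exact ne_comm

-- A's running-min fold equals Python min() of the same values
theorem minfold_some : ∀ (t : List Int) (x : Int),
    t.foldl (fun hd d => if pyInfGt hd d then some d else hd) (some x) = some (t.foldl min x) := by
  intro t
  induction t with
  | nil => intro x; simp
  | cons y t ih =>
    intro x
    simp only [List.foldl_cons]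
    have h1 : (if pyInfGt (some x) y then some y else some x) = some (min x y) := by
      simp only [pyInfGt]
      split_ifs with h
      · simp only [decide_eq_true_eq] at h
        simp only [Option.some.injEq]
        omega
      · simp only [decide_eq_true_eq, not_lt] at h
        simp only [Option.some.injEq]
        omega
    rw [h1, ih]

theorem minfold_eq_min? (x : Int) (t : List Int) :
    (x :: t).foldl (fun hd d => if pyInfGt hd d then some d else hd) none =
      PySem.List.min? (x :: t) (fun y => y) := by
  rw [PySem.List.min?_id_cons]
  simp only [List.foldl_cons]
  have h0 : (if pyInfGt none x then some x else (none : Option Int)) = some x := by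
    simp [pyInfGt]
  rw [h0, minfold_some]

-- one step of B's sweep, on counts in `(range n).map h` form
theorem step_eq (s : List Char) (n : Nat) (h : Nat → Int) (j0 : Int) (c : Char) :
    (PySem.List.enumerate ((List.range n).map h) 0).map
        (fun iN => if PySem.List.pyGet? s (iN.1 + j0) ≠ some c then iN.2 + 1 else iN.2) =
      (List.range n).map
        (fun (i : Nat) => if PySem.List.pyGet? s ((i : Int) + j0) ≠ some c then h i + 1 else h i) := by
  apply List.ext_getElem?
  intro m
  by_cases hm : m < n
  · simp [hm, PySem.List.getElem_enumerate, List.getElem_map, List.getElem_range]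
  · simp [hm]

theorem partialMism_cons (s : List Char) (c : Char) (ps : List Char) (j0 i : Nat) :
    partialMism s (c :: ps) j0 i =
      (if s[i + j0]? ≠ some c then (1 : Int) else 0) + partialMism s ps (j0 + 1) i := by
  unfold partialMism
  simp only [List.length_cons, List.range_succ_eq_map, List.countP_cons, List.countP_map]
  have hfun : ((fun t => decide (s[i + j0 + t]? ≠ (c :: ps)[t]?)) ∘ Nat.succ) =
      (fun t => decide (s[i + (j0 + 1) + t]? ≠ ps[t]?)) := by
    funext t
    have hidx : i + j0 + Nat.succ t = i + (j0 + 1) + t := by omega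
    simp only [Function.comp_apply, hidx, List.getElem?_cons_succ]
  rw [hfun]
  by_cases hc : s[i + j0]? = some c
  · simp [hc]
  · simp only [hc, ne_eq, not_false_iff, if_pos, Nat.add_zero, List.getElem?_cons_zero,
      decide_eq_true_eq]
    push_cast
    ring

-- B's whole sweep over the enumerated pattern, on counts in `(range n).map h` form
theorem bfold_eq (s : List Char) : ∀ (ps : List Char) (j0 : Nat) (n : Nat) (h : Nat → Int),
    (PySem.List.enumerate ps ((j0 : Nat) : Int)).foldl
        (fun counts jc =>
          (PySem.List.enumerate counts 0).map
            (fun iN => if PySem.List.pyGet? s (iN.1 + jc.1) ≠ some jc.2 then iN.2 + 1 else iN.2))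
        ((List.range n).map h) =
      (List.range n).map (fun i => h i + partialMism s ps j0 i) := by
  intro ps
  induction ps with
  | nil =>
    intro j0 n h
    simp [PySem.List.enumerate_nil, partialMism]
  | cons c ps ih =>
    intro j0 n h
    rw [PySem.List.enumerate_cons, List.foldl_cons]
    dsimp only
    rw [step_eq s n h (j0 : Int) c]
    have hcast : ((j0 : Int) + 1) = (((j0 + 1 : Nat)) : Int) := by push_cast; ring
    rw [hcast, ih (j0 + 1) n]
    apply List.map_congr_left
    intro i hi
    simp only [List.mem_range] at hi
    have hg : PySem.List.pyGet? s ((i : Int) + (j0 : Int)) = s[i + j0]? := by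
      have hcast2 : ((i : Int) + (j0 : Int)) = (((i + j0 : Nat)) : Int) := by push_cast; ring
      rw [hcast2, PySem.List.pyGet?_natCast]
    rw [partialMism_cons, hg]
    by_cases hc : s[i + j0]? = some c
    · simp [hc]
    · simp only [hc, ne_eq, not_false_iff, if_true]
      ring

-- fold congruence under pointwise agreement on members
theorem foldl_congr_mem {α β : Type} (l : List α) (f g : β → α → β) (a : β)
    (h : ∀ b : β, ∀ x ∈ l, f b x = g b x) : l.foldl f a = l.foldl g a := by
  induction l generalizing a with
  | nil => rfl
  | cons x t ih =>
    simp only [List.foldl_cons]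
    rw [h a x (by simp)]
    exact ih _ (fun b y hy => h b y (by simp [hy]))

-- the per-sequence values agree
theorem seq_eq (p s : List Char) (hk : p.length ≤ s.length) :
    ((PySem.List.pyRange 0 ((s.length : Int) - (p.length : Int) + 1) 1).foldl
        (fun hd i =>
          if pyInfGt hd (hammingDistA p (PySem.List.slice s (some i) (some (i + (p.length : Int)))))
          then some (hammingDistA p (PySem.List.slice s (some i) (some (i + (p.length : Int)))))
          else hd) none).getD 0 =
      (PySem.List.min?
        ((PySem.List.enumerate p 0).foldl
          (fun counts jc =>
            (PySem.List.enumerate counts 0).map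
              (fun iN => if PySem.List.pyGet? s (iN.1 + jc.1) ≠ some jc.2 then iN.2 + 1 else iN.2))
          (List.replicate (s.length + 1 - p.length) 0))
        (fun x => x)).getD 0 := by
  set n : Nat := s.length + 1 - p.length with hn
  have hn1 : 1 ≤ n := by omega
  -- B side: counts list = (range n).map (partialMism s p 0 ·)
  have hB : (PySem.List.enumerate p 0).foldl
      (fun counts jc =>
        (PySem.List.enumerate counts 0).map
          (fun iN => if PySem.List.pyGet? s (iN.1 + jc.1) ≠ some jc.2 then iN.2 + 1 else iN.2))
      (List.replicate n 0) = (List.range n).map (fun i => partialMism s p 0 i) := by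
    have hrep : (List.replicate n (0 : Int)) = (List.range n).map (fun _ => (0 : Int)) := by
      simp [List.map_const']
    have hb := bfold_eq s p 0 n (fun _ => (0 : Int))
    simp only [Nat.cast_zero, zero_add] at hb
    rw [hrep, hb]
  -- A side: the traversed values are the same list
  have hcast : ((s.length : Int) - (p.length : Int) + 1) = (n : Int) := by
    push_cast [hn]; omega
  have hA : (PySem.List.pyRange 0 ((s.length : Int) - (p.length : Int) + 1) 1).foldl
      (fun hd i =>
        if pyInfGt hd (hammingDistA p (PySem.List.slice s (some i) (some (i + (p.length : Int)))))
        then some (hammingDistA p (PySem.List.slice s (some i) (some (i + (p.length : Int)))))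
        else hd) none =
      ((List.range n).map (fun i => partialMism s p 0 i)).foldl
        (fun hd d => if pyInfGt hd d then some d else hd) none := by
    rw [hcast, PySem.List.pyRange_one, List.foldl_map, List.foldl_map]
    simp only [zero_add, sub_zero, Int.toNat_natCast]
    apply foldl_congr_mem
    intro acc t ht
    simp only [List.mem_range] at ht
    rw [window_eq p s t (by omega)]
  rw [hA, hB]
  rcases hxt : (List.range n).map (fun i => partialMism s p 0 i) with _ | ⟨x, t⟩
  · exfalso
    have hlen := congrArg List.length hxt
    simp at hlen
    omega
  · rw [minfold_eq_min? x t]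

-- fold congruence over the dna list
theorem fold_add_congr (f g : String → Int) :
    ∀ (l : List String) (acc : Int), (∀ sq ∈ l, f sq = g sq) →
      l.foldl (fun a x => a + f x) acc = l.foldl (fun a x => a + g x) acc := by
  intro l
  induction l with
  | nil => intro acc _; rfl
  | cons sq t ih =>
    intro acc hl
    simp only [List.foldl_cons]
    rw [hl sq (by simp), ih _ (fun x hx => hl x (by simp [hx]))]

-- ===== VERDICT (by name: the statement is the Claim_ definition above) =====
theorem pattern_sequence_dist_spec : Claim_equal_pattern_sequence_dist := by
  intro pattern dna _hdom hpre
  unfold Spec_pattern_sequence_dist pattern_sequence_dist pattern_sequence_dist_alt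
  dsimp only
  exact fold_add_congr _ _ dna 0
    (fun sq hsq => seq_eq pattern.toList sq.toList (hpre sq hsq))
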